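-- pv_equiv track=rewrite | github.com/bgebelek/Python | mosh_hamedani_exercise_3.py | demerit_points
-- ===== SOURCE A (Python) =====
-- def demerit_points(speed):
--     if speed <= 70:
--         return "Ok"
--     else:
--         points = -1
--         for x in range (70, speed + 1, 5):
--             if points == 12:
--                 return "License Suspended"
--             points += 1
--         return f"Points: {points}"
-- ===== SOURCE B (Python) =====
-- def demerit_points(speed):
--     if speed <= 70:
--         return "Ok"
--     p = (speed - 70) // 5
--     if p >= 13:
--         return "License Suspended"
--     return f"Points: {p}"
-- ===== Notes on version B (the rewrite author's own statement) =====
-- stated objective: simpler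
-- what changed: Replaced the counting loop with its accumulator and early return by a closed-form number of five-unit steps above the limit and a single threshold test.
import Mathlib
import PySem

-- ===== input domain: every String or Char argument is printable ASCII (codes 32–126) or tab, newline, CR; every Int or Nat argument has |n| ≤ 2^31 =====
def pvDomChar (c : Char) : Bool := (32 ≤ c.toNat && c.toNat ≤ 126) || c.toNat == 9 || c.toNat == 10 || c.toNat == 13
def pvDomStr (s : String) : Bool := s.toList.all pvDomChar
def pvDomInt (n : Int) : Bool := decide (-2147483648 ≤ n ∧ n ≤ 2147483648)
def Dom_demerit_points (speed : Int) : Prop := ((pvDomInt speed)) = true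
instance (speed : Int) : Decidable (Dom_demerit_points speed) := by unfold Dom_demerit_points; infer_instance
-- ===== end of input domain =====

-- B replaces A's counting loop by a closed-form step count and one threshold test (simpler).


-- ===== PORT A =====
-- the for-loop over range(70, speed+1, 5) with the 'points' accumulator and the early return
def demeritLoopA : List Int → Int → String
  | [], points => "Points: " ++ PySem.Int.toStr points
  | _ :: xs, points =>
      if points = 12 then "License Suspended" else demeritLoopA xs (points + 1)

def demerit_points (speed : Int) : String :=
  if speed ≤ 70 then "Ok"
  else demeritLoopA (PySem.List.pyRange 70 (speed + 1) 5) (-1)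

-- ===== PORT B =====
def demerit_points_alt (speed : Int) : String :=
  if speed ≤ 70 then "Ok"
  else
    let p := PySem.Int.floordiv (speed - 70) 5
    if 13 ≤ p then "License Suspended" else "Points: " ++ PySem.Int.toStr p

-- ===== PRECONDITION & SPEC =====
def Spec_demerit_points (speed : Int) (out : String) : Prop := out = demerit_points_alt speed
instance (speed : Int) (out : String) : Decidable (Spec_demerit_points speed out) := by unfold Spec_demerit_points; infer_instance

-- ===== CLAIM (what is proved, stated in full; the proofs are below) =====
def Claim_equal_demerit_points : Prop := ∀ (speed : Int), Dom_demerit_points speed → Spec_demerit_points speed (demerit_points speed)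

-- ===== LEMMAS AND PROOFS =====

-- A's loop suspends iff the list is long enough to drive 'points' to 12, else counts its length.
theorem demeritLoopA_eq (l : List Int) : ∀ p : Int, p ≤ 12 →
    demeritLoopA l p =
      if 12 - p < (l.length : Int) then "License Suspended"
      else "Points: " ++ PySem.Int.toStr (p + l.length) := by
  induction l with
  | nil =>
      intro p hp
      rw [demeritLoopA, if_neg (by simp; omega)]
      simp
  | cons x xs ih =>
      intro p hp
      by_cases h12 : p = 12
      · subst h12
        rw [demeritLoopA, if_pos rfl, if_pos (by simp)]
      · rw [demeritLoopA, if_neg h12, ih (p + 1) (by omega)]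
        have hiff : (12 - (p + 1) < (xs.length : Int)) ↔
            (12 - p < ((x :: xs).length : Int)) := by simp; omega
        have harg : p + 1 + (xs.length : Int) = p + ((x :: xs).length : Int) := by
          simp; omega
        rw [harg]
        by_cases hc : 12 - (p + 1) < (xs.length : Int)
        · rw [if_pos hc, if_pos (hiff.mp hc)]
        · rw [if_neg hc, if_neg (fun h => hc (hiff.mpr h))]

-- ===== VERDICT (by name: the statement is the Claim_ definition above) =====
theorem demerit_points_spec : Claim_equal_demerit_points := by
  intro speed _
  unfold Spec_demerit_points demerit_points demerit_points_alt
  by_cases h : speed ≤ 70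
  · rw [if_pos h, if_pos h]
  · rw [if_neg h, if_neg h]
    rw [PySem.List.pyRange_of_pos 70 (speed + 1) (by norm_num),
        if_pos (show (70:Int) < speed + 1 by omega)]
    rw [demeritLoopA_eq _ (-1) (by norm_num),
        PySem.Int.floordiv_eq_ediv_of_pos (by norm_num)]
    simp only [List.length_map, List.length_range]
    have hp : (speed - 70) / 5 =
        -1 + ((((speed + 1 - 70 + 5 - 1) / 5).toNat : Int)) := by omega
    by_cases hs : 13 ≤ (speed - 70) / 5
    · rw [if_pos (by omega), if_pos hs]
    · rw [if_neg (by omega), if_neg hs, hp]
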